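-- pv_equiv track=rewrite | github.com/garg-tech/Computer-Networks | CRC.py | Sender
-- ===== SOURCE A (Python) =====
-- from math import log2
--
-- def Sender(dataword: int, key: int) -> int:
--     n = int(log2(dataword)) + 1
--     k = int(log2(key)) + 1
--     codeword = dataword << (k-1)
--     temp = key << (n-1)
--     remainder = codeword ^ temp
--     n -= 1
--     while(n>0):
--         temp = key << (n-1)
--         if(remainder & (1<<(n+k-2))):
--             remainder = remainder ^ temp
--         else:
--             remainder = remainder ^ 0
--         n -= 1
--
--     codeword = codeword + remainder
--     return codeword
-- ===== SOURCE B (Python) =====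
-- from math import log2
--
-- def Sender(dataword: int, key: int) -> int:
--     # Standard CRC shift-register: feed the augmented message bit by bit
--     # through a (k-1)-bit register, XORing in the generator on overflow.
--     n = int(log2(dataword)) + 1
--     k = int(log2(key)) + 1
--     codeword = dataword << (k - 1)
--     reg = 0
--     for i in range(n + k - 2, -1, -1):
--         reg = (reg << 1) | ((codeword >> i) & 1)
--         if (reg >> (k - 1)) & 1:
--             reg ^= key
--     return codeword + reg
-- ===== Notes on version B (the rewrite author's own statement) =====
-- stated objective: idiomatic
-- what changed: Replaces A's full-width remainder that is reduced by XORing whole shifted copies of the key at decreasing bit positions with the standard CRC shift-register: a (k-1)-bit running register into which the augmented message bits are fed MSB-first, XORing the key on overflow.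
import Mathlib
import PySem

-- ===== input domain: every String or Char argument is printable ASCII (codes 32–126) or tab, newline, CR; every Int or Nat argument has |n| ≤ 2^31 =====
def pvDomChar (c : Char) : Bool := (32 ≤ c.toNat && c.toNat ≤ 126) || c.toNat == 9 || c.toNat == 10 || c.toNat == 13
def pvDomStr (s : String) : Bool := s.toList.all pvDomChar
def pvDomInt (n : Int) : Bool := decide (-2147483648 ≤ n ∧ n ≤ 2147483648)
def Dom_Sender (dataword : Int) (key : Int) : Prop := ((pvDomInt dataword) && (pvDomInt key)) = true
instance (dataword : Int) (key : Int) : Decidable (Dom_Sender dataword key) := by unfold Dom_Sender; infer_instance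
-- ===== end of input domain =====

-- B replaces A's full-width remainder (XORing whole shifted copies of the key) by the
-- standard CRC shift-register fed MSB-first; objective: idiomatic, same cost.

-- ===== PORT A =====
-- A's `while n > 0` loop; fuel is the current value of n (k ≥ 1 at every call site).
-- At fuel m+1 the current n is m+1, so `n+k-2` is m+k-1 and `n-1` is m.
def senderLoopA (key k : Nat) : Nat → Nat → Nat
  | 0, remainder => remainder
  | m + 1, remainder =>
      let temp := key <<< m
      let remainder :=
        if remainder &&& (1 <<< (m + k - 1)) ≠ 0 then remainder ^^^ temp
        else remainder ^^^ 0
      senderLoopA key k m remainder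

-- `int(log2 x) + 1` is ported as `Nat.log 2 x + 1`: exact for 1 ≤ x ≤ 2^31 (inside
-- Dom_ and Pre_), where float log2's floor equals ⌊log2 x⌋.  All values are
-- nonnegative under Pre_, so the computation is carried out on Nat.
def Sender (dataword : Int) (key : Int) : Int :=
  let d := dataword.toNat
  let g := key.toNat
  let n := Nat.log 2 d + 1
  let k := Nat.log 2 g + 1
  let codeword := d <<< (k - 1)
  let temp := g <<< (n - 1)
  let remainder := codeword ^^^ temp
  Int.ofNat (codeword + senderLoopA g k (n - 1) remainder)

-- ===== PORT B =====
-- one shift-register step of Source B's `for i in range(n+k-2, -1, -1)` body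
def senderStepB (key k codeword reg i : Nat) : Nat :=
  let reg := (reg <<< 1) ||| ((codeword >>> i) &&& 1)
  if (reg >>> (k - 1)) &&& 1 ≠ 0 then reg ^^^ key else reg

def Sender_alt (dataword : Int) (key : Int) : Int :=
  let d := dataword.toNat
  let g := key.toNat
  let n := Nat.log 2 d + 1
  let k := Nat.log 2 g + 1
  let codeword := d <<< (k - 1)
  -- for i in range(n+k-2, -1, -1): i runs n+k-2, …, 0
  let reg := ((List.range (n + k - 1)).reverse).foldl (senderStepB g k codeword) 0
  Int.ofNat (codeword + reg)

-- ===== PRECONDITION & SPEC =====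
-- Pre_ excludes exactly the inputs where A raises: math.log2 raises ValueError
-- on dataword ≤ 0 or key ≤ 0.
def Pre_Sender (dataword : Int) (key : Int) : Prop := 1 ≤ dataword ∧ 1 ≤ key
instance (dataword : Int) (key : Int) : Decidable (Pre_Sender dataword key) := by
  unfold Pre_Sender; infer_instance

def pvWitness_Sender : Int × Int := (11, 5)

def Spec_Sender (dataword : Int) (key : Int) (out : Int) : Prop := out = Sender_alt dataword key
instance (dataword : Int) (key : Int) (out : Int) : Decidable (Spec_Sender dataword key out) := by unfold Spec_Sender; infer_instance

-- ===== CLAIM (what is proved, stated in full; the proofs are below) =====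
def Claim_equal_Sender : Prop := ∀ (dataword : Int) (key : Int), Dom_Sender dataword key → Pre_Sender dataword key → Spec_Sender dataword key (Sender dataword key)

-- ===== LEMMAS AND PROOFS =====

-- B's fold from step j-1 down to step 0
def bRun (g k c : Nat) (j reg : Nat) : Nat :=
  ((List.range j).reverse).foldl (senderStepB g k c) reg

theorem bRun_succ (g k c j reg : Nat) :
    bRun g k c (j + 1) reg = bRun g k c j (senderStepB g k c reg j) := by
  simp [bRun, List.range_succ]

-- testBit of the literal 1
theorem testBit_one' (n : Nat) : Nat.testBit 1 n = decide (n = 0) := by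
  rw [show (1:Nat) = 2^0 by norm_num, Nat.testBit_two_pow]
  simp [eq_comm]

-- bit-test form of the two truthiness conditions
theorem cond_and_pow (r p : Nat) : (r &&& (1 <<< p) ≠ 0) ↔ r.testBit p = true := by
  have h1 : (1 : Nat) <<< p = 2 ^ p := by simp [Nat.shiftLeft_eq]
  rw [h1, Nat.and_two_pow]
  cases h : r.testBit p <;> simp

theorem cond_shift_and (r p : Nat) : ((r >>> p) &&& 1 ≠ 0) ↔ r.testBit p = true := by
  rw [Nat.and_one_is_mod, Nat.testBit_eq_decide_div_mod_eq, Nat.shiftRight_eq_div_pow]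
  simp only [decide_eq_true_eq]
  omega

-- shifting the next message bit into the register reproduces c >>> i
theorem shift_in (c i : Nat) :
    ((c >>> (i + 1)) <<< 1) ||| ((c >>> i) &&& 1) = c >>> i := by
  apply Nat.eq_of_testBit_eq
  intro j
  cases j with
  | zero => simp
  | succ t =>
      simp only [Nat.testBit_or, Nat.testBit_shiftLeft, Nat.testBit_and,
        Nat.testBit_shiftRight, testBit_one']
      simp
      rw [show i + 1 + t = i + (t + 1) by omega]

-- xor distributes over shiftLeft
theorem xor_shiftLeft (a b j : Nat) : (a ^^^ b) <<< j = (a <<< j) ^^^ (b <<< j) := by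
  apply Nat.eq_of_testBit_eq
  intro i
  by_cases h : j ≤ i <;> simp [Nat.testBit_xor, Nat.testBit_shiftLeft, h]

-- splitting off bit j: shifting the register by one and or-ing in bit j of c,
-- then re-aligning, yields the same full-width value
theorem decomp (reg c j : Nat) :
    (((reg <<< 1) ||| ((c >>> j) &&& 1)) <<< j) ^^^ (c % 2 ^ j)
      = (reg <<< (j + 1)) ^^^ (c % 2 ^ (j + 1)) := by
  apply Nat.eq_of_testBit_eq
  intro i
  simp only [Nat.testBit_xor, Nat.testBit_shiftLeft, Nat.testBit_or, Nat.testBit_and,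
    Nat.testBit_shiftRight, Nat.testBit_mod_two_pow, testBit_one']
  rcases lt_trichotomy i j with h | h | h
  · simp [h, Nat.lt_succ_of_lt h, show ¬ (j ≤ i) by omega, show ¬ (j+1 ≤ i) by omega]
  · subst h
    simp
  · have h1 : j ≤ i := by omega
    have h2 : j + 1 ≤ i := by omega
    have h3 : ¬ (i < j) := by omega
    have h4 : ¬ (i < j + 1) := by omega
    have h5 : ¬ (i - j = 0) := by omega
    have h6 : i - j - 1 = i - (j + 1) := by omega
    have h7 : 1 ≤ i - j := by omega
    simp [h1, h2, h3, h4, h5, h6, h7]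

-- recombination of high and low parts
theorem split_recombine (c j : Nat) : ((c >>> j) <<< j) ^^^ (c % 2 ^ j) = c := by
  apply Nat.eq_of_testBit_eq
  intro i
  simp only [Nat.testBit_xor, Nat.testBit_shiftLeft, Nat.testBit_shiftRight,
    Nat.testBit_mod_two_pow]
  by_cases h : j ≤ i
  · simp [h, Nat.add_sub_cancel' h, show ¬ (i < j) by omega]
  · simp [h, show i < j by omega]

-- the central bridge: A's remaining loop (fuel j) on the full-width remainder
-- (reg <<< j) ^^^ (c % 2^j) computes exactly B's remaining fold (steps j-1 … 0)
theorem bridge (g κ c : Nat) :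
    ∀ j reg, senderLoopA g (κ + 1) j ((reg <<< j) ^^^ (c % 2 ^ j)) = bRun g (κ + 1) c j reg := by
  intro j
  induction j with
  | zero => intro reg; simp [senderLoopA, bRun, Nat.mod_one]
  | succ j ih =>
      intro reg
      set reg1 := (reg <<< 1) ||| ((c >>> j) &&& 1) with hreg1
      have hR : (reg <<< (j + 1)) ^^^ (c % 2 ^ (j + 1)) = (reg1 <<< j) ^^^ (c % 2 ^ j) :=
        (decomp reg c j).symm
      -- the two conditions agree: full-width bit j+κ = register bit κ
      have hbit : ((reg1 <<< j) ^^^ (c % 2 ^ j)).testBit (j + κ) = reg1.testBit κ := by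
        simp [Nat.testBit_xor, Nat.testBit_shiftLeft, Nat.testBit_mod_two_pow]
      rw [bRun_succ]
      show senderLoopA g (κ + 1) (j + 1) _ = _
      rw [senderLoopA]
      simp only [hR]
      rw [show j + (κ + 1) - 1 = j + κ by omega]
      by_cases hc : ((reg1 <<< j) ^^^ (c % 2 ^ j)).testBit (j + κ) = true
      · rw [if_pos ((cond_and_pow _ _).mpr hc)]
        have hstep : senderStepB g (κ + 1) c reg j = reg1 ^^^ g := by
          simp only [senderStepB, Nat.add_sub_cancel, ← hreg1]
          rw [if_pos ((cond_shift_and reg1 κ).mpr (hbit ▸ hc))]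
        rw [hstep, ← ih (reg1 ^^^ g)]
        congr 1
        rw [xor_shiftLeft, Nat.shiftLeft_eq g j,
          Nat.xor_assoc, Nat.xor_assoc, Nat.xor_comm (c % 2 ^ j)]
      · rw [if_neg (fun h => hc ((cond_and_pow _ _).mp h))]
        have hstep : senderStepB g (κ + 1) c reg j = reg1 := by
          simp only [senderStepB, Nat.add_sub_cancel, ← hreg1]
          rw [if_neg (fun h => hc (hbit ▸ (cond_shift_and reg1 κ).mp h))]
        rw [hstep, ← ih reg1, Nat.xor_zero]

-- leading steps of B (bits above position n-1 of c) only load the register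
theorem front (g κ c n : Nat) (hc : c < 2 ^ (n + κ)) :
    ∀ t, bRun g (κ + 1) c (n + t) (c >>> (n + t)) = bRun g (κ + 1) c n (c >>> n) := by
  intro t
  induction t with
  | zero => rfl
  | succ t ih =>
      have hb : c.testBit (n + t + κ) = false :=
        Nat.testBit_lt_two_pow (lt_of_lt_of_le hc (Nat.pow_le_pow_right (by norm_num) (by omega)))
      have hstep : senderStepB g (κ + 1) c (c >>> (n + t + 1)) (n + t) = c >>> (n + t) := by
        simp only [senderStepB, Nat.add_sub_cancel, shift_in]
        rw [if_neg]
        intro h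
        have h2 := (cond_shift_and _ κ).mp h
        rw [Nat.testBit_shiftRight] at h2
        rw [hb] at h2
        exact Bool.false_ne_true h2
      have : n + (t + 1) = (n + t) + 1 := by omega
      rw [this, bRun_succ, hstep, ih]

-- the top bit of x sits at Nat.log 2 x
theorem testBit_log (x : Nat) (hx : 1 ≤ x) : x.testBit (Nat.log 2 x) = true := by
  have h1 : 2 ^ Nat.log 2 x ≤ x := Nat.pow_log_le_self 2 (by omega)
  have h2 : x < 2 ^ (Nat.log 2 x + 1) := Nat.lt_pow_succ_log_self (by norm_num) x
  rw [Nat.testBit_eq_decide_div_mod_eq]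
  have hp : 0 < 2 ^ Nat.log 2 x := by positivity
  have hdiv : x / 2 ^ Nat.log 2 x = 1 := by
    rw [pow_succ] at h2
    have h3 : 1 ≤ x / 2 ^ Nat.log 2 x := (Nat.le_div_iff_mul_le hp).mpr (by omega)
    have h4 : x / 2 ^ Nat.log 2 x < 2 := Nat.div_lt_of_lt_mul (by omega)
    omega
  simp [hdiv]

theorem sender_nat_eq (d g : Nat) (hd : 1 ≤ d) (_hg : 1 ≤ g) :
    senderLoopA g (Nat.log 2 g + 1) (Nat.log 2 d)
        ((d <<< Nat.log 2 g) ^^^ (g <<< Nat.log 2 d))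
      = bRun g (Nat.log 2 g + 1) (d <<< Nat.log 2 g) (Nat.log 2 d + 1 + Nat.log 2 g) 0 := by
  set ν := Nat.log 2 d
  set κ := Nat.log 2 g
  set c := d <<< κ with hc
  have hdlt : d < 2 ^ (ν + 1) := Nat.lt_pow_succ_log_self (by norm_num) d
  have hclt : c < 2 ^ (ν + 1 + κ) := by
    rw [hc, Nat.shiftLeft_eq, pow_add]
    exact Nat.mul_lt_mul_of_lt_of_le hdlt le_rfl (by positivity)
  have hctop : c.testBit (ν + κ) = true := by
    rw [hc, Nat.testBit_shiftLeft]
    simp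
    exact testBit_log d hd
  -- B: the first κ steps load the register, giving c >>> (ν+1)
  have h0 : (0 : Nat) = c >>> (ν + 1 + κ) := by
    rw [Nat.shiftRight_eq_div_pow, Nat.div_eq_of_lt hclt]
  have hfront : bRun g (κ + 1) c (ν + 1 + κ) 0 = bRun g (κ + 1) c (ν + 1) (c >>> (ν + 1)) := by
    rw [h0]; exact front g κ c (ν + 1) hclt κ
  -- the handoff step at i = ν: the condition fires (top bit of c), XORing in g
  have hhand : bRun g (κ + 1) c (ν + 1) (c >>> (ν + 1)) = bRun g (κ + 1) c ν ((c >>> ν) ^^^ g) := by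
    rw [bRun_succ]
    congr 1
    simp only [senderStepB, Nat.add_sub_cancel, shift_in]
    rw [if_pos]
    rw [cond_shift_and, Nat.testBit_shiftRight]
    exact hctop
  -- A's starting remainder in bridge form
  have hstart : c ^^^ (g <<< ν) = (((c >>> ν) ^^^ g) <<< ν) ^^^ (c % 2 ^ ν) := by
    rw [xor_shiftLeft, Nat.xor_assoc, Nat.xor_comm (g <<< ν), ← Nat.xor_assoc,
      split_recombine]
  calc senderLoopA g (κ + 1) ν (c ^^^ (g <<< ν))
      = senderLoopA g (κ + 1) ν ((((c >>> ν) ^^^ g) <<< ν) ^^^ (c % 2 ^ ν)) := by rw [hstart]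
    _ = bRun g (κ + 1) c ν ((c >>> ν) ^^^ g) := bridge g κ c ν _
    _ = bRun g (κ + 1) c (ν + 1 + κ) 0 := by rw [hfront, hhand]

-- ===== VERDICT (by name: the statement is the Claim_ definition above) =====
theorem Sender_spec : Claim_equal_Sender := by
  intro dataword key _ hpre
  obtain ⟨hd, hg⟩ := hpre
  have hd1 : 1 ≤ dataword.toNat := by omega
  have hg1 : 1 ≤ key.toNat := by omega
  have key_eq := sender_nat_eq dataword.toNat key.toNat hd1 hg1
  unfold bRun at key_eq
  show Sender dataword key = Sender_alt dataword key
  unfold Sender Sender_alt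
  simp only [Nat.add_sub_cancel]
  rw [show Nat.log 2 dataword.toNat + 1 + (Nat.log 2 key.toNat + 1) - 1
      = Nat.log 2 dataword.toNat + 1 + Nat.log 2 key.toNat by omega]
  rw [key_eq]
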